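-- pv_equiv track=rewrite | github.com/rlarkdms/Algorithm_and_Test | level3/최고의 집합.py | solution
-- ===== SOURCE A (Python) =====
-- def solution(n, s):
--     # 곱하기는 숫자들의 크기가 차이가 안날때가 가장 이상적이게 됨.
--     # 이 문제는 굉장히 간단한 문제로 말그대로 숫자의 크기 차이가 얼마 안나야함
--     answer = []
--     k=s//n#그래서 나눗셈과
--     m=s%n#나머지를 통해서 몇개가 1를 더해야하는지 알아내고 알아낸 값만큼 append해주는거임.
--     if k==0:
--         answer.append(-1)
--         return answer
--
--     for i in range(0,n-m):
--         answer.append(k)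
--     for j in range(n-m,n):
--         answer.append(k+1)
--
--     return answer
-- ===== SOURCE B (Python) =====
-- def solution(n, s):
--     # Greedy: distribute s over n slots, always giving the current floor share.
--     if s // n == 0:
--         return [-1]
--     answer = []
--     remaining, count = s, n
--     while count > 0:
--         v = remaining // count
--         answer.append(v)
--         remaining -= v
--         count -= 1
--     return answer
-- ===== Notes on version B (the rewrite author's own statement) =====
-- stated objective: alternative
-- what changed: Replaces the upfront k=s//n, m=s%n computation with two replicate loops by a single greedy loop that keeps (remaining, count) state and emits remaining//count each step, distributing the remainder dynamically.
import Mathlib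
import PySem

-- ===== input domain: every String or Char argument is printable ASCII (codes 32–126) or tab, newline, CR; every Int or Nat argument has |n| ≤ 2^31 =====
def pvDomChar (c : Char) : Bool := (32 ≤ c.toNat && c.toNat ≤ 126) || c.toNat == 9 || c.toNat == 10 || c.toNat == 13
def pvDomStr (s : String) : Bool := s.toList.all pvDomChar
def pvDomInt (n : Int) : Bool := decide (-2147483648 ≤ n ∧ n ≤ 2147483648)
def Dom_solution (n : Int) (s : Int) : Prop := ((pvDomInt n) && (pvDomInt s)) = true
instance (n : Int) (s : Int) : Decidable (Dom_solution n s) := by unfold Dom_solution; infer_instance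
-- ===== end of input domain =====

-- B replaces the upfront k = s//n, m = s%n + two replicate loops by one greedy
-- loop over (remaining, count) emitting remaining//count each step (objective: alternative).

-- ===== PORT A =====
def solution (n : Int) (s : Int) : List Int :=
  let k := PySem.Int.floordiv s n
  let m := PySem.Int.mod s n
  if k = 0 then [(-1 : Int)]
  else
    let answer := (PySem.List.pyRange 0 (n - m) 1).foldl (fun acc _ => acc ++ [k]) []
    (PySem.List.pyRange (n - m) n 1).foldl (fun acc _ => acc ++ [k + 1]) answer

-- ===== PORT B =====
-- while count > 0: v = remaining//count; append v; remaining -= v; count -= 1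
def altLoop (remaining count : Int) : List Int :=
  if h : 0 < count then
    let v := PySem.Int.floordiv remaining count
    v :: altLoop (remaining - v) (count - 1)
  else []
termination_by count.toNat
decreasing_by omega

def solution_alt (n : Int) (s : Int) : List Int :=
  if PySem.Int.floordiv s n = 0 then [(-1 : Int)]
  else altLoop s n

-- ===== PRECONDITION & SPEC =====
-- Python A raises ZeroDivisionError at s//n when n == 0; excluded.
def Pre_solution (n : Int) (s : Int) : Prop := n ≠ 0
instance (n : Int) (s : Int) : Decidable (Pre_solution n s) := by unfold Pre_solution; infer_instance
def pvWitness_solution : Int × Int := (5, 14)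

def Spec_solution (n : Int) (s : Int) (out : List Int) : Prop := out = solution_alt n s
instance (n : Int) (s : Int) (out : List Int) : Decidable (Spec_solution n s out) := by unfold Spec_solution; infer_instance

-- ===== CLAIM (what is proved, stated in full; the proofs are below) =====
def Claim_equal_solution : Prop := ∀ (n : Int) (s : Int), Dom_solution n s → Pre_solution n s → Spec_solution n s (solution n s)

-- ===== LEMMAS AND PROOFS =====

theorem altLoop_nonpos (r c : Int) (h : c ≤ 0) : altLoop r c = [] := by
  rw [altLoop]; simp [show ¬ 0 < c by omega]

theorem foldl_app_const (l : List Int) (init : List Int) (x : Int) :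
    l.foldl (fun acc _ => acc ++ [x]) init = init ++ List.replicate l.length x := by
  induction l generalizing init with
  | nil => simp
  | cons a t ih => simp [List.foldl, ih, List.replicate_succ]

theorem altLoop_eq : ∀ (c : Int), 1 ≤ c → ∀ r : Int,
    altLoop r c = List.replicate (c - PySem.Int.mod r c).toNat (PySem.Int.floordiv r c)
      ++ List.replicate (PySem.Int.mod r c).toNat (PySem.Int.floordiv r c + 1) := by
  intro c hc
  induction c, hc using Int.le_induction with
  | base =>
    intro r
    rw [altLoop]
    simp [altLoop_nonpos]
  | succ c hc ih =>
    intro r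
    have hcp : (0:Int) < c + 1 := by omega
    rw [altLoop]
    simp only [dif_pos hcp]
    rw [show c + 1 - 1 = c from by ring]
    rw [PySem.Int.floordiv_eq_ediv_of_pos hcp, PySem.Int.mod_eq_emod_of_pos hcp]
    have hrm : (c + 1) * (r / (c + 1)) + r % (c + 1) = r := Int.mul_ediv_add_emod r (c + 1)
    have hm0 : 0 ≤ r % (c + 1) := Int.emod_nonneg r (by omega)
    have hmlt : r % (c + 1) < c + 1 := Int.emod_lt_of_pos r hcp
    generalize hgk : r / (c + 1) = k at hrm ⊢
    generalize hgm : r % (c + 1) = m at hrm hm0 hmlt ⊢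
    have hrk0 : (c + 1) * k = c * k + k := by ring
    rw [ih (r - k)]
    rw [PySem.Int.floordiv_eq_ediv_of_pos (by omega : (0:Int) < c),
        PySem.Int.mod_eq_emod_of_pos (by omega : (0:Int) < c)]
    have hrk : r - k = k * c + m := by rw [mul_comm]; omega
    by_cases hmc : m < c
    · have hdiv : (r - k) / c = k := by
        rw [hrk, add_comm, Int.add_mul_ediv_right _ _ (by omega : (c:Int) ≠ 0),
            Int.ediv_eq_zero_of_lt hm0 hmc]
        ring
      have hmod : (r - k) % c = m := by
        rw [hrk, add_comm, mul_comm, Int.add_mul_emod_self_left]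
        exact Int.emod_eq_of_lt hm0 hmc
      rw [hdiv, hmod]
      rw [show (c + 1 - m).toNat = (c - m).toNat + 1 from by omega, List.replicate_succ]
      simp
    · have hmeq : m = c := by omega
      have hrk' : r - k = (k + 1) * c := by rw [hrk, hmeq]; ring
      have hdiv : (r - k) / c = k + 1 := by
        rw [hrk', Int.mul_ediv_cancel _ (by omega : (c:Int) ≠ 0)]
      have hmod : (r - k) % c = 0 := by
        rw [hrk', Int.mul_emod_left]
      rw [hdiv, hmod, hmeq]
      rw [show (c + 1 - c).toNat = 1 from by omega]
      simp [List.replicate_succ]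

-- ===== VERDICT (by name: the statement is the Claim_ definition above) =====
theorem solution_spec : Claim_equal_solution := by
  unfold Claim_equal_solution Spec_solution
  intro n s _ hpre
  by_cases hk : PySem.Int.floordiv s n = 0
  · simp [solution, solution_alt, hk]
  · rcases lt_or_gt_of_ne hpre with hneg | hpos
    · have hm := PySem.Int.mod_neg_bounds (a := s) (b := n) hneg
      simp only [solution, solution_alt, if_neg hk]
      rw [PySem.List.pyRange_one_eq_nil (by omega),
          PySem.List.pyRange_one_eq_nil (by omega),
          altLoop_nonpos s n (by omega)]
      simp
    · have h0 := PySem.Int.mod_nonneg (a := s) hpos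
      have h1 := PySem.Int.mod_lt (a := s) hpos
      simp only [solution, solution_alt, if_neg hk]
      rw [altLoop_eq n (by omega) s, foldl_app_const, foldl_app_const,
          PySem.List.length_pyRange_one, PySem.List.length_pyRange_one]
      rw [show n - (n - PySem.Int.mod s n) = PySem.Int.mod s n from by ring]
      simp
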